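-- pv_equiv track=rewrite | github.com/Ashraful7679/ar_automation | logic_engine.py | _deduplicate_headers
-- ===== SOURCE A (Python) =====
-- def _deduplicate_headers(headers):
--     seen = {}
--     new_headers = []
--     for h in headers:
--         h = str(h).strip()
--         if h in seen:
--             seen[h] += 1
--             new_headers.append(f"{h}_{seen[h]}")
--         else:
--             seen[h] = 0
--             new_headers.append(h)
--     return new_headers
-- ===== SOURCE B (Python) =====
-- def _deduplicate_headers(headers):
--     items = [str(h).strip() for h in headers]
--     groups = {}
--     for i, x in enumerate(items):
--         groups[x] = groups.get(x, []) + [i]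
--     out = [""] * len(items)
--     for x, idxs in groups.items():
--         for k, i in enumerate(idxs):
--             out[i] = x if k == 0 else f"{x}_{k}"
--     return out
-- ===== Notes on version B (the rewrite author's own statement) =====
-- stated objective: alternative
-- what changed: B is a two-phase bucket-then-scatter: it first groups the positions of each stripped value into a per-value index list, then scatters the numbered names into a preallocated output by random-access position, instead of A's single sequential append pass with a running seen-counter.
import Mathlib
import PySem

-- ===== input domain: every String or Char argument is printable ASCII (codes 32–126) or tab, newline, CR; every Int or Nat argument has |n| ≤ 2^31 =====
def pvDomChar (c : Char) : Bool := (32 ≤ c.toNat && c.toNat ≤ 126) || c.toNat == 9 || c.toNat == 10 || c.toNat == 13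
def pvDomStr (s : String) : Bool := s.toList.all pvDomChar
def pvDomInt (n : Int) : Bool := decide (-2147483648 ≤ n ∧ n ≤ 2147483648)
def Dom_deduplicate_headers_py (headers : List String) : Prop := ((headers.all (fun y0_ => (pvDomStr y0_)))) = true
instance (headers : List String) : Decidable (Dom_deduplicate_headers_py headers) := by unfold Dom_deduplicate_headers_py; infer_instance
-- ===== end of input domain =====

-- B replaces A's single sequential pass with a running seen-counter by a two-phase
-- bucket-then-scatter: group the positions of each stripped value, then scatter the
-- numbered names into a preallocated output by position; objective: alternative.

-- ===== PORT A =====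
-- loop 'for h in headers' with state (seen, new_headers), transcribed as structural recursion emitting the appended element
def dedupA_go (seen : PySem.Dict String Int) (hs : List String) : List String :=
  match hs with
  | [] => []
  | h :: t =>
    let h := PySem.Str.strip h
    if seen.contains h then
      let n := seen.getD h 0 + 1
      (h ++ "_" ++ PySem.Int.toStr n) :: dedupA_go (seen.insert h n) t
    else
      h :: dedupA_go (seen.insert h 0) t

def deduplicate_headers_py (headers : List String) : List String :=
  dedupA_go PySem.Dict.empty headers

-- ===== PORT B =====
def deduplicate_headers_py_alt (headers : List String) : List String :=
  let items := headers.map PySem.Str.strip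
  -- groups[x] = groups.get(x, []) + [i]
  let groups := (PySem.List.enumerate items).foldl
      (fun g p => g.modify p.2 [] (fun l => l ++ [p.1])) PySem.Dict.empty
  -- out = [""] * len(items); then for x, idxs in groups.items(): for k, i in enumerate(idxs): out[i] = …
  let out := List.replicate items.length ""
  groups.items.foldl (fun out q =>
    (PySem.List.enumerate q.2).foldl (fun o r =>
      PySem.List.pySetD o r.2 (if r.1 = 0 then q.1 else q.1 ++ "_" ++ PySem.Int.toStr r.1)) out) out

-- ===== PRECONDITION & SPEC =====
def Spec_deduplicate_headers_py (headers : List String) (out : List String) : Prop := out = deduplicate_headers_py_alt headers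
instance (headers : List String) (out : List String) : Decidable (Spec_deduplicate_headers_py headers out) := by unfold Spec_deduplicate_headers_py; infer_instance

-- ===== CLAIM (what is proved, stated in full; the proofs are below) =====
def Claim_equal_deduplicate_headers_py : Prop := ∀ (headers : List String), Dom_deduplicate_headers_py headers → Spec_deduplicate_headers_py headers (deduplicate_headers_py headers)

-- ===== LEMMAS AND PROOFS =====

-- common reference form: output at each position from the count of the (stripped) value
-- in the processed prefix p; 'rest' is already stripped
def specGo (p : List String) (rest : List String) : List String :=
  match rest with
  | [] => []
  | x :: t =>
    let c := p.count x
    (if c = 0 then x else x ++ "_" ++ PySem.Int.toStr (c : Int)) :: specGo (p ++ [x]) t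

lemma specGo_length (rest : List String) : ∀ p, (specGo p rest).length = rest.length := by
  induction rest with
  | nil => intro p; rfl
  | cons x t ih => intro p; simp [specGo, ih]

lemma specGo_getD (rest : List String) : ∀ (p : List String) (j : Nat), j < rest.length →
    (specGo p rest).getD j "" =
      (let x := rest.getD j ""
       let c := (p ++ rest.take j).count x
       if c = 0 then x else x ++ "_" ++ PySem.Int.toStr (c : Int)) := by
  induction rest with
  | nil => intro p j hj; simp at hj
  | cons x t ih =>
    intro p j hj
    cases j with
    | zero => simp [specGo]
    | succ j =>
      have hj' : j < t.length := by simpa using hj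
      have := ih (p ++ [x]) j hj'
      simpa [specGo, List.append_assoc] using this

-- A's loop state invariant: seen.contains v ↔ v occurred in the prefix, and then seen[v] = count - 1
lemma dedupA_go_eq (rest : List String) : ∀ (p : List String) (seen : PySem.Dict String Int),
    (∀ v, seen.contains v = decide (0 < p.count v)) →
    (∀ v, 0 < p.count v → seen.getD v 0 = (p.count v : Int) - 1) →
    dedupA_go seen rest = specGo p (rest.map PySem.Str.strip) := by
  induction rest with
  | nil => intro p seen _ _; rfl
  | cons h t ih =>
    intro p seen hc hg
    simp only [dedupA_go, List.map_cons, specGo]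
    set h' := PySem.Str.strip h with hh'
    by_cases hmem : 0 < p.count h'
    · have hcontains : seen.contains h' = true := by rw [hc]; simpa using hmem
      rw [hcontains, if_pos rfl]
      have hval : seen.getD h' 0 = (p.count h' : Int) - 1 := hg h' hmem
      congr 1
      · rw [hval]
        have : ((p.count h' : Int) - 1) + 1 = (p.count h' : Int) := by ring
        rw [this]
        have h0 : ¬ (p.count h' = 0) := by omega
        simp [h0]
      · apply ih
        · intro v
          rw [PySem.Dict.contains_insert, hc]
          by_cases hv : v = h'
          · subst hv; simp [hmem, List.count_append]
          · have : (v == h') = false := by simp [hv]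
            simp [this, List.count_append, hv]
        · intro v hv
          by_cases hveq : v = h'
          · subst hveq
            rw [PySem.Dict.getD_insert_self, hval]
            have : (p ++ [h']).count h' = p.count h' + 1 := by simp [List.count_append]
            rw [this]; push_cast; ring
          · rw [PySem.Dict.getD_insert, if_neg hveq]
            have hcv : (p ++ [h']).count v = p.count v := by
              simp [List.count_append, Ne.symm hveq]
            rw [hcv] at hv ⊢
            exact hg v hv
    · have hcontains : seen.contains h' = false := by rw [hc]; simpa using hmem
      rw [hcontains, if_neg (by simp)]
      have h0 : p.count h' = 0 := by omega
      rw [if_pos h0]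
      refine congrArg (List.cons h') (ih (p ++ [h']) (seen.insert h' 0) ?_ ?_)
      · intro v
        rw [PySem.Dict.contains_insert, hc]
        by_cases hv : v = h'
        · subst hv; simp [List.count_append]
        · have : (v == h') = false := by simp [hv]
          simp [this, List.count_append, hv]
      · intro v hv
        by_cases hveq : v = h'
        · subst hveq
          rw [PySem.Dict.getD_insert_self]
          have : (p ++ [h']).count h' = 1 := by simp [List.count_append, h0]
          rw [this]; norm_num
        · rw [PySem.Dict.getD_insert, if_neg hveq]
          have hcv : (p ++ [h']).count v = p.count v := by
            simp [List.count_append, Ne.symm hveq]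
          rw [hcv] at hv ⊢
          exact hg v hv

-- scatter of one group: positions S (strictly increasing Nats), values v (s + rank)
lemma scatter_length (S : List Nat) (v : Int → String) :
    ∀ (s : Int) (out : List String),
    ((PySem.List.enumerate (S.map (fun n : Nat => (n : Int))) s).foldl
      (fun o r => PySem.List.pySetD o r.2 (v r.1)) out).length = out.length := by
  induction S with
  | nil => intro s out; rfl
  | cons n t ih =>
    intro s out
    simp only [List.map_cons, PySem.List.enumerate_cons, List.foldl_cons]
    rw [ih]
    simp [PySem.List.pySetD_natCast]

lemma scatter_getD (S : List Nat) (v : Int → String) :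
    ∀ (s : Int) (out : List String), S.Pairwise (· < ·) →
    ∀ (j : Nat),
    ((PySem.List.enumerate (S.map (fun n : Nat => (n : Int))) s).foldl
      (fun o r => PySem.List.pySetD o r.2 (v r.1)) out).getD j "" =
      if j ∈ S ∧ j < out.length then v (s + (S.idxOf j : Int)) else out.getD j "" := by
  induction S with
  | nil => intro s out _ j; simp
  | cons n t ih =>
    intro s out hsort j
    simp only [List.map_cons, PySem.List.enumerate_cons, List.foldl_cons,
      PySem.List.pySetD_natCast]
    rw [ih (s+1) (out.set n (v s)) hsort.of_cons j]
    by_cases hjn : j = n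
    · subst hjn
      have hnot : j ∉ t := fun hmem => absurd (List.rel_of_pairwise_cons hsort hmem) (lt_irrefl j)
      simp only [hnot, false_and, if_false]
      by_cases hj : j < out.length
      · simp [List.idxOf_cons_self, hj, List.getD_eq_getElem?_getD]
      · have : out.set j (v s) = out := List.set_eq_of_length_le (by omega)
        simp [hj, this]
    · have hne : (j ∈ t ∧ j < out.length) ↔ (j ∈ n :: t ∧ j < out.length) := by
        simp [List.mem_cons, hjn]
      rw [List.length_set]
      by_cases hmem : j ∈ t ∧ j < out.length
      · have hmem' : j ∈ n :: t ∧ j < out.length := hne.mp hmem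
        rw [if_pos hmem, if_pos hmem']
        have : (n :: t).idxOf j = t.idxOf j + 1 := by
          simp [hjn, Ne.symm]
        rw [this]
        push_cast
        ring_nf
      · rw [if_neg hmem, if_neg (fun h => hmem (⟨(hne.mpr h).1, h.2⟩))]
        simp [List.getD_eq_getElem?_getD, List.getElem?_set_ne (Ne.symm hjn)]

-- rank of j in a filtered range is the count of hits below j
lemma idxOf_filter_range (n j : Nat) (p : Nat → Bool) (hj : j < n) (hpj : p j = true) :
    ((List.range n).filter p).idxOf j = ((List.range j).filter p).length := by
  have hsplit : List.range n = List.range j ++ j :: (List.range (n - (j+1))).map (j+1+·) := by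
    have h1 : List.range n = List.range (j+1) ++ (List.range (n - (j+1))).map (j+1+·) := by
      rw [← List.range_add]; congr 1; omega
    rw [h1, List.range_succ]; simp
  rw [hsplit, List.filter_append, List.idxOf_append_of_notMem, List.filter_cons_of_pos hpj]
  · simp [List.idxOf_cons_self]
  · intro hmem
    have := List.mem_range.mp (List.mem_of_mem_filter hmem)
    omega

-- count over a prefix via the filtered range
lemma countP_range_eq_count_take (items : List String) (x : String) :
    ∀ (j : Nat), j ≤ items.length →
    ((List.range j).filter (fun i : Nat => PySem.List.pyGetD items (i : Int) "" == x)).length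
      = (items.take j).count x := by
  intro j hj
  induction j with
  | zero => simp
  | succ j ih =>
    have hj' : j ≤ items.length := by omega
    have hlt : j < items.length := by omega
    rw [List.range_succ, List.filter_append, List.length_append, ih hj']
    have htake : items.take (j+1) = items.take j ++ [items[j]] := by
      rw [List.take_add_one]; simp [List.getElem?_eq_getElem hlt]
    rw [htake, List.count_append]
    have hget : PySem.List.pyGetD items ((j : Nat) : Int) "" = items[j] := by
      rw [PySem.List.pyGetD_natCast]
      simp [List.getD_eq_getElem?_getD, List.getElem?_eq_getElem hlt]
    by_cases hx : items[j] = x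
    · simp [PySem.List.pyGetD, List.getElem?_eq_getElem hlt, hx]
    · simp [PySem.List.pyGetD, List.getElem?_eq_getElem hlt, hx]

-- the group dict of B: value list for key x = positions of x as Ints, increasing
lemma groups_getD (items : List String) (x : String) :
    ((PySem.List.enumerate items).foldl
        (fun g p => g.modify p.2 [] (fun l => l ++ [p.1])) PySem.Dict.empty).getD x []
      = ((List.range items.length).filter
          (fun i : Nat => PySem.List.pyGetD items (i : Int) "" == x)).map (fun n : Nat => (n : Int)) := by
  have hmap : PySem.List.enumerate items = ((PySem.List.enumerate items).map Prod.swap).map Prod.swap := by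
    simp
  rw [hmap, List.foldl_map]
  have := PySem.Dict.getD_foldl_modify_append (l := (PySem.List.enumerate items).map Prod.swap)
    (d := (PySem.Dict.empty : PySem.Dict String (List Int))) (c := x)
  simp only [Prod.swap] at this ⊢
  rw [this]
  rw [PySem.Dict.getD_empty]
  simp only [List.nil_append]
  rw [PySem.List.enumerate_eq_map_pyRange (d := "")]
  rw [List.map_map, List.filter_map, List.map_map]
  rw [show PySem.List.len items = ((items.length : Nat) : Int) from rfl]
  rw [PySem.List.pyRange_zero_natCast]
  rw [List.filter_map, List.map_map]
  simp only [Function.comp_def, PySem.List.pyGetD_natCast]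
  simp

-- the numbered name expected at position j (reference form of one output element)
def dedupF (items : List String) (j : Nat) : String :=
  let x := PySem.List.pyGetD items (j : Int) ""
  let c := (items.take j).count x
  if c = 0 then x else x ++ "_" ++ PySem.Int.toStr (c : Int)

-- scattering one group writes dedupF at exactly the positions holding x
lemma group_scatter_getD (items : List String) (x : String) (out : List String)
    (hout : out.length = items.length) (j : Nat) :
    ((PySem.List.enumerate (((List.range items.length).filter
        (fun i : Nat => PySem.List.pyGetD items (i : Int) "" == x)).map (fun n : Nat => (n : Int)))).foldl
      (fun o r => PySem.List.pySetD o r.2 (if r.1 = 0 then x else x ++ "_" ++ PySem.Int.toStr r.1)) out).getD j ""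
    = if PySem.List.pyGetD items (j : Int) "" = x ∧ j < items.length then dedupF items j
      else out.getD j "" := by
  have hsort : ((List.range items.length).filter
      (fun i : Nat => PySem.List.pyGetD items (i : Int) "" == x)).Pairwise (· < ·) :=
    (List.pairwise_lt_range).filter _
  rw [scatter_getD _ (fun k => if k = 0 then x else x ++ "_" ++ PySem.Int.toStr k) 0 out hsort j]
  have hmem : (j ∈ (List.range items.length).filter
      (fun i : Nat => PySem.List.pyGetD items (i : Int) "" == x) ∧ j < out.length)
      ↔ (PySem.List.pyGetD items (j : Int) "" = x ∧ j < items.length) := by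
    simp [List.mem_filter, List.mem_range, hout]; tauto
  by_cases hc : PySem.List.pyGetD items (j : Int) "" = x ∧ j < items.length
  · rw [if_pos (hmem.mpr hc), if_pos hc]
    have hj : j < items.length := hc.2
    have hpj : (PySem.List.pyGetD items (j : Int) "" == x) = true := by simp [hc.1]
    rw [idxOf_filter_range items.length j _ hj hpj,
      countP_range_eq_count_take items x j (le_of_lt hj)]
    unfold dedupF
    rw [hc.1]
    simp only [zero_add, Nat.cast_eq_zero]
  · rw [if_neg (fun h => hc (hmem.mp h)), if_neg hc]

-- folding the scatter over a list of keys
lemma outer_scatter (items : List String) (K : List String) : ∀ (out : List String),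
    out.length = items.length →
    (K.foldl (fun out x =>
        (PySem.List.enumerate (((List.range items.length).filter
            (fun i : Nat => PySem.List.pyGetD items (i : Int) "" == x)).map (fun n : Nat => (n : Int)))).foldl
          (fun o r => PySem.List.pySetD o r.2 (if r.1 = 0 then x else x ++ "_" ++ PySem.Int.toStr r.1)) out)
      out).length = out.length ∧
    ∀ j, (K.foldl (fun out x =>
        (PySem.List.enumerate (((List.range items.length).filter
            (fun i : Nat => PySem.List.pyGetD items (i : Int) "" == x)).map (fun n : Nat => (n : Int)))).foldl
          (fun o r => PySem.List.pySetD o r.2 (if r.1 = 0 then x else x ++ "_" ++ PySem.Int.toStr r.1)) out)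
      out).getD j ""
      = if PySem.List.pyGetD items (j : Int) "" ∈ K ∧ j < items.length then dedupF items j
        else out.getD j "" := by
  induction K with
  | nil => intro out hout; simp
  | cons x K' ih =>
    intro out hout
    simp only [List.foldl_cons]
    have hlen' : ((PySem.List.enumerate (((List.range items.length).filter
        (fun i : Nat => PySem.List.pyGetD items (i : Int) "" == x)).map (fun n : Nat => (n : Int)))).foldl
      (fun o r => PySem.List.pySetD o r.2 (if r.1 = 0 then x else x ++ "_" ++ PySem.Int.toStr r.1)) out).length
        = out.length := scatter_length _ (fun k => if k = 0 then x else x ++ "_" ++ PySem.Int.toStr k) 0 out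
    obtain ⟨ihlen, ihget⟩ := ih _ (hlen'.trans hout)
    refine ⟨ihlen.trans hlen', fun j => ?_⟩
    rw [ihget j, group_scatter_getD items x out hout j]
    by_cases h1 : PySem.List.pyGetD items (j : Int) "" ∈ K' ∧ j < items.length
    · rw [if_pos h1, if_pos ⟨List.mem_cons_of_mem _ h1.1, h1.2⟩]
    · rw [if_neg h1]
      by_cases h2 : PySem.List.pyGetD items (j : Int) "" = x ∧ j < items.length
      · rw [if_pos h2, if_pos ⟨by simp [h2.1], h2.2⟩]
      · rw [if_neg h2, if_neg (fun h => ?_)]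
        rcases List.mem_cons.mp h.1 with h3 | h3
        · exact h2 ⟨h3, h.2⟩
        · exact h1 ⟨h3, h.2⟩

-- B computes the reference form
lemma alt_eq_specGo (headers : List String) :
    deduplicate_headers_py_alt headers = specGo [] (headers.map PySem.Str.strip) := by
  unfold deduplicate_headers_py_alt
  simp only []
  set items := headers.map PySem.Str.strip with hitems
  set groups := (PySem.List.enumerate items).foldl
      (fun g p => g.modify p.2 [] (fun l => l ++ [p.1])) PySem.Dict.empty with hgroups
  have hnodup : groups.keys.Nodup := by
    rw [hgroups]
    exact PySem.Dict.nodup_keys_foldl_modify_key (PySem.List.enumerate items)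
      (fun p => p.2) [] (fun _ p l => l ++ [p.1]) PySem.Dict.empty
      (by rw [PySem.Dict.keys_empty]; exact List.nodup_nil)
  have hkeys : groups.keys = PySem.Set.ofList items := by
    rw [hgroups]
    rw [PySem.Dict.keys_foldl_modify_key (PySem.List.enumerate items)
      (fun p => p.2) [] (fun _ p l => l ++ [p.1]) PySem.Dict.empty]
    rw [PySem.List.map_snd_enumerate, PySem.Dict.keys_empty]
    rfl
  have hitemsd : groups.items = (PySem.Set.ofList items).map
      (fun k => (k, ((List.range items.length).filter
        (fun i : Nat => PySem.List.pyGetD items (i : Int) "" == k)).map (fun n : Nat => (n : Int)))) := by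
    rw [PySem.Dict.items_eq_map_keys groups hnodup [], hkeys]
    refine List.map_congr_left (fun k _ => ?_)
    rw [hgroups, groups_getD items k]
  rw [hitemsd, List.foldl_map]
  obtain ⟨hlen, hget⟩ := outer_scatter items (PySem.Set.ofList items)
    (List.replicate items.length "") (by simp)
  apply List.ext_getElem
  · rw [hlen]; simp [specGo_length]
  · intro j h1 h2
    have hj : j < items.length := by have h1' := h1; rw [hlen] at h1'; simpa using h1'
    have hgetj : PySem.List.pyGetD items (j : Int) "" = items[j] := by
      rw [PySem.List.pyGetD_natCast]
      simp [List.getD_eq_getElem?_getD, List.getElem?_eq_getElem hj]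
    have hmemk : PySem.List.pyGetD items (j : Int) "" ∈ PySem.Set.ofList items := by
      rw [(PySem.Set.mem_ofList items _), hgetj]; exact List.getElem_mem hj
    have hL := hget j
    rw [if_pos ⟨hmemk, by simpa using hj⟩] at hL
    have hR := specGo_getD items [] j hj
    simp only [List.nil_append] at hR
    rw [List.getD_eq_getElem?_getD, List.getElem?_eq_getElem h1] at hL
    rw [List.getD_eq_getElem?_getD, List.getElem?_eq_getElem h2] at hR
    simp only [Option.getD_some] at hL hR
    rw [hL, hR]
    unfold dedupF
    rw [hgetj]
    have : items.getD j "" = items[j] := by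
      simp [List.getD_eq_getElem?_getD, List.getElem?_eq_getElem hj]
    rw [this]

-- ===== VERDICT (by name: the statement is the Claim_ definition above) =====
theorem deduplicate_headers_py_spec : Claim_equal_deduplicate_headers_py := by
  intro headers _
  unfold Spec_deduplicate_headers_py deduplicate_headers_py
  rw [alt_eq_specGo headers]
  apply dedupA_go_eq
  · intro v; simp [PySem.Dict.contains_empty]
  · intro v hv; simp at hv
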